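-- pv_equiv track=rewrite | github.com/alejandrodelcs/GuiaEjercicios | parcialguarna/ejercicio1.py | elegir_pelicula
-- ===== SOURCE A (Python) =====
-- def elegir_pelicula(actores, puntajes):
--     actores_validos =  ["Emma Stone", "Jazmin Stuart", "Leonardo Di Crapio", "Susana Gimenez"]
--     elegido = False
--     for act in actores:
--         for pts in puntajes:
--             if act in actores_validos and pts in [678910]:
--                 elegido = True
--
--     return elegido
-- ===== SOURCE B (Python) =====
-- def elegir_pelicula(actores, puntajes):
--     actores_validos = ["Emma Stone", "Jazmin Stuart", "Leonardo Di Crapio", "Susana Gimenez"]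
--     return any(act in actores_validos for act in actores) and any(pts == 678910 for pts in puntajes)
-- ===== Notes on version B (the rewrite author's own statement) =====
-- stated objective: faster
-- what changed: Replaced the O(n*m) nested scan over actors x scores by two independent existence checks (any valid actor) and (any score == 678910), which are equivalent because the inner condition factors into independent parts.
import Mathlib
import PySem

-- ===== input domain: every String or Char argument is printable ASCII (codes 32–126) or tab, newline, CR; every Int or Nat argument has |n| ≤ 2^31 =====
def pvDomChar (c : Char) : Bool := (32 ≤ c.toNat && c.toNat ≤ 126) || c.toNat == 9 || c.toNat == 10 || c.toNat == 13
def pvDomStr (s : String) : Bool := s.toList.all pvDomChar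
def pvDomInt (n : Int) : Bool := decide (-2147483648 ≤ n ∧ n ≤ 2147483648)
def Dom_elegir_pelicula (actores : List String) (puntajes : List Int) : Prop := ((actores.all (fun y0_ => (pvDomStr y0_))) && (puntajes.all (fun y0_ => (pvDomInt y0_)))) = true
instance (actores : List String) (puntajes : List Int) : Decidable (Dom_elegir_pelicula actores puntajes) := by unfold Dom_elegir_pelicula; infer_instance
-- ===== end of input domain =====

-- B replaces the nested O(n*m) scan by two independent O(n)+O(m) existence checks (faster; proved equal).

-- ===== PORT A =====
def pvValidos : List String := ["Emma Stone", "Jazmin Stuart", "Leonardo Di Crapio", "Susana Gimenez"]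

def elegir_pelicula (actores : List String) (puntajes : List Int) : Bool :=
  actores.foldl (fun elegido act =>
    puntajes.foldl (fun elegido pts =>
      if pvValidos.contains act && [(678910 : Int)].contains pts then true else elegido)
      elegido)
    false

-- ===== PORT B =====
def elegir_pelicula_alt (actores : List String) (puntajes : List Int) : Bool :=
  (actores.any (fun act => pvValidos.contains act)) && (puntajes.any (fun pts => pts == 678910))

-- ===== PRECONDITION & SPEC =====
def Spec_elegir_pelicula (actores : List String) (puntajes : List Int) (out : Bool) : Prop := out = elegir_pelicula_alt actores puntajes
instance (actores : List String) (puntajes : List Int) (out : Bool) : Decidable (Spec_elegir_pelicula actores puntajes out) := by unfold Spec_elegir_pelicula; infer_instance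

-- ===== CLAIM (what is proved, stated in full; the proofs are below) =====
def Claim_equal_elegir_pelicula : Prop := ∀ (actores : List String) (puntajes : List Int), Dom_elegir_pelicula actores puntajes → Spec_elegir_pelicula actores puntajes (elegir_pelicula actores puntajes)

-- ===== LEMMAS AND PROOFS =====

-- The inner loop ORs into the accumulator (valid act ∧ some score is 678910).
theorem inner_loop_eq (c : Bool) (l : List Int) (b : Bool) :
    l.foldl (fun elegido pts => if c && [(678910 : Int)].contains pts then true else elegido) b
      = (b || (c && l.any (fun pts => pts == 678910))) := by
  induction l generalizing b with
  | nil => simp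
  | cons p t ih =>
    simp only [List.foldl, List.any_cons, ih]
    cases c <;> cases hpc : (p == (678910 : Int)) <;>
      simp <;> cases b <;> simp_all

-- The outer loop ORs in (some actor valid) ∧ (some score is 678910).
theorem outer_loop_eq (la : List String) (l : List Int) (b : Bool) :
    la.foldl (fun elegido act =>
      l.foldl (fun elegido pts =>
        if pvValidos.contains act && [(678910 : Int)].contains pts then true else elegido) elegido) b
      = (b || ((la.any (fun act => pvValidos.contains act)) && l.any (fun pts => pts == 678910))) := by
  induction la generalizing b with
  | nil => simp
  | cons a t ih =>
    simp only [List.foldl, List.any_cons]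
    rw [ih, inner_loop_eq]
    cases b <;> cases pvValidos.contains a <;> cases l.any (fun pts => pts == 678910) <;> simp

-- ===== VERDICT (by name: the statement is the Claim_ definition above) =====
theorem elegir_pelicula_spec : Claim_equal_elegir_pelicula := by
  intro actores puntajes _
  unfold Spec_elegir_pelicula elegir_pelicula elegir_pelicula_alt
  rw [outer_loop_eq]
  simp
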